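-- pv_equiv track=rewrite | github.com/mrJangrouei/Closed-Form-Unitary-Downfolding | CFU.py | term_acts_nonzero_on_occ
-- ===== SOURCE A (Python) =====
-- def term_acts_nonzero_on_occ(term_tuple, occ_set):
--     occ = set(occ_set)
--     for p, a in reversed(term_tuple):
--         if a == 0:
--             if p not in occ:
--                 return False
--             occ.remove(p)
--         else:
--             if p in occ:
--                 return False
--             occ.add(p)
--     return True
-- ===== SOURCE B (Python) =====
-- def term_acts_nonzero_on_occ(term_tuple, occ_set):
--     # Group the a-values by orbital p, in the order operators are applied
--     # (rightmost first); operators on distinct orbitals are independent,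
--     # so each orbital's subsequence is checked on its own.
--     groups = {}
--     for p, a in reversed(term_tuple):
--         groups.setdefault(p, []).append(a)
--     for p, ops in groups.items():
--         state = p in occ_set
--         for a in ops:
--             if a == 0:
--                 if not state:
--                     return False
--                 state = False
--             else:
--                 if state:
--                     return False
--                 state = True
--     return True
-- ===== Notes on version B (the rewrite author's own statement) =====
-- stated objective: alternative
-- what changed: Instead of mutating one global occupation set while scanning the reversed term, B first groups the a-values per orbital into a dict and then checks each orbital's subsequence independently with a two-state per-orbital machine seeded by membership in occ_set.
import Mathlib
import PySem

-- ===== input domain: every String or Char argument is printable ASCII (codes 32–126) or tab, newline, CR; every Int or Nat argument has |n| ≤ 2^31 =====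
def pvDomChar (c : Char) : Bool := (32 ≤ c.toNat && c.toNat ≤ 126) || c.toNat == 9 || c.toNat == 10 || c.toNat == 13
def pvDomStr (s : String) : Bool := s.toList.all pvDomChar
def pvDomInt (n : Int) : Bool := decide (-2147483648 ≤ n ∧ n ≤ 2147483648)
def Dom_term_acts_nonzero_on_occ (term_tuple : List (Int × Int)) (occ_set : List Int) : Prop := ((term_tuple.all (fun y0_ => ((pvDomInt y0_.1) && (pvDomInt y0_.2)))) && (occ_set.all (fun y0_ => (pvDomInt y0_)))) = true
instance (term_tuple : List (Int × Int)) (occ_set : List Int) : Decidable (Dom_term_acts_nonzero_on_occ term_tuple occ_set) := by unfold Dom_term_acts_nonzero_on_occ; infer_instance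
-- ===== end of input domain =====

-- ===== PORT A =====
-- A walks reversed(term_tuple) mutating one occupation set (occ.remove is
-- guarded by the membership test, so Set.discard is exact here).
def pvLoopA : List (Int × Int) → PySem.Set Int → Bool
  | [], _ => true
  | (p, a) :: rest, occ =>
    if a == 0 then
      if PySem.Set.contains occ p then pvLoopA rest (PySem.Set.discard occ p) else false
    else
      if PySem.Set.contains occ p then false else pvLoopA rest (PySem.Set.add occ p)

def term_acts_nonzero_on_occ (term_tuple : List (Int × Int)) (occ_set : List Int) : Bool :=
  pvLoopA term_tuple.reverse (PySem.Set.ofList occ_set)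

-- ===== PORT B =====
-- B groups the a-values per orbital (dict, via setdefault/append = Dict.modify),
-- then checks every orbital's subsequence independently.
def pvCheckGroup : List Int → Bool → Bool
  | [], _ => true
  | a :: rest, state =>
    if a == 0 then
      if state then pvCheckGroup rest false else false
    else
      if state then false else pvCheckGroup rest true

def pvGroups (term_tuple : List (Int × Int)) : PySem.Dict Int (List Int) :=
  term_tuple.reverse.foldl (fun d p => d.modify p.1 [] fun x => x ++ [p.2]) PySem.Dict.empty

def term_acts_nonzero_on_occ_alt (term_tuple : List (Int × Int)) (occ_set : List Int) : Bool :=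
  (pvGroups term_tuple).items.all fun kv => pvCheckGroup kv.2 (occ_set.contains kv.1)

-- ===== PRECONDITION & SPEC =====
def Spec_term_acts_nonzero_on_occ (term_tuple : List (Int × Int)) (occ_set : List Int) (out : Bool) : Prop := out = term_acts_nonzero_on_occ_alt term_tuple occ_set
instance (term_tuple : List (Int × Int)) (occ_set : List Int) (out : Bool) : Decidable (Spec_term_acts_nonzero_on_occ term_tuple occ_set out) := by unfold Spec_term_acts_nonzero_on_occ; infer_instance

-- ===== CLAIM (what is proved, stated in full; the proofs are below) =====
def Claim_equal_term_acts_nonzero_on_occ : Prop := ∀ (term_tuple : List (Int × Int)) (occ_set : List Int), Dom_term_acts_nonzero_on_occ term_tuple occ_set → Spec_term_acts_nonzero_on_occ term_tuple occ_set (term_acts_nonzero_on_occ term_tuple occ_set)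

-- ===== LEMMAS AND PROOFS =====

-- the subsequence of a-values of orbital q, in the order pvLoopA meets them
def pvProj (q : Int) (L : List (Int × Int)) : List Int :=
  List.map (fun x => x.2) (List.filter (fun p => p.1 == q) L)

lemma pvProj_nil (q : Int) : pvProj q [] = [] := rfl

lemma pvProj_cons (q : Int) (p : Int × Int) (L : List (Int × Int)) :
    pvProj q (p :: L) = if p.1 == q then p.2 :: pvProj q L else pvProj q L := by
  by_cases h : p.1 == q <;> simp [pvProj, h]

lemma pvProj_eq_nil_of_not_mem (q : Int) (L : List (Int × Int))
    (h : q ∉ L.map (fun x => x.1)) : pvProj q L = [] := by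
  simp only [List.mem_map, not_exists, not_and] at h
  simp only [pvProj, List.map_eq_nil_iff, List.filter_eq_nil_iff, beq_iff_eq]
  intro x hx
  exact fun hxq => h x hx hxq

lemma pvContains_discard (s : PySem.Set Int) (p q : Int) :
    PySem.Set.contains (PySem.Set.discard s p) q = if q = p then false else PySem.Set.contains s q := by
  rcases eq_or_ne q p with h | h
  · simp [h, PySem.Set.mem_discard]
  · simp [h, PySem.Set.mem_discard]

lemma pvContains_add (s : PySem.Set Int) (p q : Int) :
    PySem.Set.contains (PySem.Set.add s p) q = if q = p then true else PySem.Set.contains s q := by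
  rcases eq_or_ne q p with h | h
  · simp [h, PySem.Set.mem_add]
  · simp [h, PySem.Set.mem_add]

-- A's one global mutating pass succeeds iff every orbital's subsequence passes on its own:
-- operators on distinct orbitals touch disjoint parts of the occupation set
lemma pvLoopA_iff (L : List (Int × Int)) :
    ∀ occ : PySem.Set Int,
      (pvLoopA L occ = true ↔ ∀ q : Int, pvCheckGroup (pvProj q L) (PySem.Set.contains occ q) = true) := by
  induction L with
  | nil => intro occ; simp [pvLoopA, pvProj_nil, pvCheckGroup]
  | cons pa rest ih =>
    intro occ
    obtain ⟨p, a⟩ := pa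
    by_cases ha : a = 0
    · by_cases hm : PySem.Set.contains occ p = true
      · have e : pvLoopA ((p, a) :: rest) occ = pvLoopA rest (PySem.Set.discard occ p) := by
          simp only [pvLoopA]; rw [if_pos (by simp [ha]), if_pos hm]
        rw [e, ih]
        apply forall_congr'
        intro q
        rcases eq_or_ne q p with hq | hq
        · subst hq
          rw [pvProj_cons, if_pos (by simp), pvContains_discard, if_pos rfl, hm]
          simp [pvCheckGroup, ha]
        · rw [pvProj_cons, if_neg (by simpa using Ne.symm hq), pvContains_discard, if_neg hq]
      · have e : pvLoopA ((p, a) :: rest) occ = false := by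
          simp only [pvLoopA]; rw [if_pos (by simp [ha]), if_neg hm]
        rw [e]
        constructor
        · intro h; cases h
        · intro h
          exfalso
          have hp := h p
          have hm' : PySem.Set.contains occ p = false := eq_false_of_ne_true hm
          rw [pvProj_cons, if_pos (by simp), hm'] at hp
          simp [pvCheckGroup, ha] at hp
    · by_cases hm : PySem.Set.contains occ p = true
      · have e : pvLoopA ((p, a) :: rest) occ = false := by
          simp only [pvLoopA]; rw [if_neg (by simp [ha]), if_pos hm]
        rw [e]
        constructor
        · intro h; cases h
        · intro h
          exfalso
          have hp := h p
          rw [pvProj_cons, if_pos (by simp), hm] at hp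
          simp [pvCheckGroup, ha] at hp
      · have e : pvLoopA ((p, a) :: rest) occ = pvLoopA rest (PySem.Set.add occ p) := by
          simp only [pvLoopA]; rw [if_neg (by simp [ha]), if_neg hm]
        rw [e, ih]
        apply forall_congr'
        intro q
        rcases eq_or_ne q p with hq | hq
        · subst hq
          have hm' : PySem.Set.contains occ q = false := eq_false_of_ne_true hm
          rw [pvProj_cons, if_pos (by simp), pvContains_add, if_pos rfl, hm']
          simp [pvCheckGroup, ha]
        · rw [pvProj_cons, if_neg (by simpa using Ne.symm hq), pvContains_add, if_neg hq]

-- B's dict maps each key to exactly that orbital's subsequence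
lemma pvGroups_getD (t : List (Int × Int)) (q : Int) :
    (pvGroups t).getD q [] = pvProj q t.reverse := by
  rw [pvGroups, PySem.Dict.getD_foldl_modify_append, PySem.Dict.getD_empty,
    List.nil_append]
  simp only [pvProj]

lemma pvGroups_keys (t : List (Int × Int)) :
    (pvGroups t).keys = PySem.Set.ofList (t.reverse.map (fun x => x.1)) := by
  rw [pvGroups,
    PySem.Dict.keys_foldl_modify_key t.reverse (fun x => x.1) []
      (fun _ x => fun v => v ++ [x.2]) PySem.Dict.empty]
  rw [PySem.Dict.keys_empty, PySem.Set.update_eq_foldl, ← PySem.Set.ofList_eq_foldl]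

lemma pvAlt_iff (t : List (Int × Int)) (o : List Int) :
    (term_acts_nonzero_on_occ_alt t o = true ↔
      ∀ q : Int, pvCheckGroup (pvProj q t.reverse) (o.contains q) = true) := by
  have hnodup : (pvGroups t).keys.Nodup := by
    rw [pvGroups_keys]; exact PySem.Set.nodup_ofList _
  rw [term_acts_nonzero_on_occ_alt, PySem.Dict.items_eq_map_keys _ hnodup []]
  simp only [List.all_map, Function.comp, List.all_eq_true]
  constructor
  · intro h q
    by_cases hk : q ∈ (pvGroups t).keys
    · have := h q hk
      rwa [pvGroups_getD] at this
    · rw [pvProj_eq_nil_of_not_mem]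
      · rfl
      · rw [pvGroups_keys] at hk
        simpa [PySem.Set.mem_ofList] using hk
  · intro h q _
    rw [pvGroups_getD]
    exact h q

lemma pvContains_ofList (o : List Int) (q : Int) :
    PySem.Set.contains (PySem.Set.ofList o) q = o.contains q := by
  simp [PySem.Set.mem_ofList]

-- ===== VERDICT (by name: the statement is the Claim_ definition above) =====
theorem term_acts_nonzero_on_occ_spec : Claim_equal_term_acts_nonzero_on_occ := by
  intro t o _
  show term_acts_nonzero_on_occ t o = term_acts_nonzero_on_occ_alt t o
  rw [Bool.eq_iff_iff, term_acts_nonzero_on_occ, pvLoopA_iff, pvAlt_iff]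
  constructor <;> intro h q <;> have hq := h q <;>
    simpa [pvContains_ofList] using hq
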